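-- pv_equiv track=rewrite | github.com/triplebob/emis-xml-convertor | util_modules/ui/tabs/tab_helpers.py | _select_best_clinical_code_entry
-- ===== SOURCE A (Python) =====
-- def _select_best_clinical_code_entry(codes_group):
--     """
--     Select the best clinical code entry from a group of duplicates.
--
--     Prioritizes:
--     1. Entries with 'Found' mapping status
--     2. Entries with complete descriptions
--     3. Most recent entries
--
--     Args:
--         codes_group: List of clinical code dictionaries with same EMIS GUID
--
--     Returns:
--         Best clinical code dictionary from the group
--     """
--     if len(codes_group) == 1:
--         return codes_group[0]
--
--     # Priority 1: Found mappings
--     found_codes = [c for c in codes_group if c.get('Mapping Found') == 'Found']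
--     if found_codes:
--         codes_group = found_codes
--
--     # Priority 2: Complete descriptions
--     complete_codes = [c for c in codes_group if c.get('Description', '').strip()]
--     if complete_codes:
--         codes_group = complete_codes
--
--     # Priority 3: Most complete entry (most non-empty fields)
--     def completeness_score(code):
--         return sum(1 for v in code.values() if v and str(v).strip())
--
--     return max(codes_group, key=completeness_score)
-- ===== SOURCE B (Python) =====
-- def _select_best_clinical_code_entry(codes_group):
--     """Single-pass selection: running best under a lexicographic
--     (found, has-description, completeness) key; first maximum wins."""
--     def key(c):
--         found = 1 if c.get('Mapping Found') == 'Found' else 0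
--         desc = 1 if c.get('Description', '').strip() else 0
--         score = sum(1 for v in c.values() if v and str(v).strip())
--         return (found, desc, score)
--     best = codes_group[0]
--     for c in codes_group[1:]:
--         if key(c) > key(best):
--             best = c
--     return best
-- ===== Notes on version B (the rewrite author's own statement) =====
-- stated objective: simpler
-- what changed: Replaced the three candidate-filtering passes plus a final max with a single left-to-right pass keeping a running best under a lexicographic (found, has-description, completeness) key.
import Mathlib
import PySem

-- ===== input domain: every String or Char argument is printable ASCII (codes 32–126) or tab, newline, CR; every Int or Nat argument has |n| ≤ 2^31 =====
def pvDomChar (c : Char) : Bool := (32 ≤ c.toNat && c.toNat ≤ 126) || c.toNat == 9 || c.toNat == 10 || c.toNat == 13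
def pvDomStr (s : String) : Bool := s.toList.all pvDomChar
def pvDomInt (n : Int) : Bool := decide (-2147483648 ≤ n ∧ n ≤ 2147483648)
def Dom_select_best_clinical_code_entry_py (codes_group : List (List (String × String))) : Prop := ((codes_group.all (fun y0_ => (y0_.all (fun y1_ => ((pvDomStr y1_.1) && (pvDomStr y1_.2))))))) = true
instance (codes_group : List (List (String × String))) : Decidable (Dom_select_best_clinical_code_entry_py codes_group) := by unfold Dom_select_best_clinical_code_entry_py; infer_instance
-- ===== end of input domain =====

-- B replaces A's three filter passes + final max by one pass with a running best under a
-- lexicographic (found, has-description, completeness) key; objective: simpler.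


-- ===== PORT A =====
-- each code is a Python dict: decode the association list with PySem.Dict.ofList (last value
-- wins per key, first position kept), return the chosen dict's items
def pvTruthyStripped (v : String) : Bool := v != "" && PySem.Str.strip v != ""

-- completeness_score: sum(1 for v in code.values() if v and str(v).strip())
def pvCompletenessScore (c : PySem.Dict String String) : Int :=
  (c.values.countP pvTruthyStripped : Int)

-- c.get('Mapping Found') == 'Found'
def pvFoundTest (c : PySem.Dict String String) : Bool :=
  c.get? "Mapping Found" == some "Found"

-- bool(c.get('Description', '').strip())
def pvDescTest (c : PySem.Dict String String) : Bool :=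
  PySem.Str.strip (c.getD "Description" "") != ""

def select_best_clinical_code_entry_py (codes_group : List (List (String × String))) : List (String × String) :=
  let ds := codes_group.map PySem.Dict.ofList
  if ds.length = 1 then (ds.headD PySem.Dict.empty).items
  else
    let found_codes := ds.filter pvFoundTest
    let g1 := if found_codes.isEmpty then ds else found_codes
    let complete_codes := g1.filter pvDescTest
    let g2 := if complete_codes.isEmpty then g1 else complete_codes
    match PySem.List.max? g2 pvCompletenessScore with
    | some m => m.items
    | none => []   -- unreachable under Pre_ (Python: ValueError from max on empty)

-- ===== PORT B =====
-- key(c) = (found, desc, score)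
def pvKeyB (c : PySem.Dict String String) : Int × Int × Int :=
  ((if pvFoundTest c then 1 else 0), (if pvDescTest c then 1 else 0), pvCompletenessScore c)

-- Python tuple '>' (lexicographic) written out on the Int triple
def pvGtKey (a b : Int × Int × Int) : Bool :=
  decide (b.1 < a.1) || (a.1 == b.1 && (decide (b.2.1 < a.2.1) || (a.2.1 == b.2.1 && decide (b.2.2 < a.2.2))))

def select_best_clinical_code_entry_py_alt (codes_group : List (List (String × String))) : List (String × String) :=
  match codes_group.map PySem.Dict.ofList with
  | [] => []   -- unreachable under Pre_ (Source B: IndexError)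
  | d :: rest =>
      (rest.foldl (fun best c => if pvGtKey (pvKeyB c) (pvKeyB best) then c else best) d).items

-- ===== PRECONDITION & SPEC =====
-- A raises on the empty list (ValueError from max, for len ≠ 1 the only raising input)
def Pre_select_best_clinical_code_entry_py (codes_group : List (List (String × String))) : Prop :=
  codes_group ≠ []
instance (codes_group : List (List (String × String))) : Decidable (Pre_select_best_clinical_code_entry_py codes_group) := by unfold Pre_select_best_clinical_code_entry_py; infer_instance

def pvWitness_select_best_clinical_code_entry_py : (List (List (String × String))) :=
  [[("Mapping Found", "Found"), ("Description", "apple")], [("Mapping Found", "x")]]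

def Spec_select_best_clinical_code_entry_py (codes_group : List (List (String × String))) (out : List (String × String)) : Prop := out = select_best_clinical_code_entry_py_alt codes_group
instance (codes_group : List (List (String × String))) (out : List (String × String)) : Decidable (Spec_select_best_clinical_code_entry_py codes_group out) := by unfold Spec_select_best_clinical_code_entry_py; infer_instance

-- ===== CLAIM (what is proved, stated in full; the proofs are below) =====
def Claim_equal_select_best_clinical_code_entry_py : Prop := ∀ (codes_group : List (List (String × String))), Dom_select_best_clinical_code_entry_py codes_group → Pre_select_best_clinical_code_entry_py codes_group → Spec_select_best_clinical_code_entry_py codes_group (select_best_clinical_code_entry_py codes_group)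

-- ===== LEMMAS AND PROOFS =====

-- m is the FIRST maximum of l under the strict 'greater' test gt
def pvIsFirstMax {α : Type} (gt : α → α → Bool) (l : List α) (m : α) : Prop :=
  ∃ u v, l = u ++ m :: v ∧ (∀ x ∈ u, gt m x = true) ∧ (∀ x ∈ v, gt x m = false)

theorem pvFold_firstMax {α : Type} (gt : α → α → Bool)
    (hasym : ∀ a b, gt a b = true → gt b a = false)
    (hchain : ∀ a b c, gt a b = true → gt c b = false → gt a c = true)
    (d : α) (rest : List α) :
    pvIsFirstMax gt (d :: rest) (rest.foldl (fun best c => if gt c best then c else best) d) := by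
  induction rest generalizing d with
  | nil => exact ⟨[], [], rfl, by simp, by simp⟩
  | cons c rest' ih =>
    simp only [List.foldl_cons]
    by_cases hc : gt c d = true
    · rw [if_pos hc]
      obtain ⟨u, v, hdec, hu, hv⟩ := ih c
      have hgm : gt (rest'.foldl (fun best x => if gt x best then x else best) c) d = true := by
        cases u with
        | nil =>
          have hm : rest'.foldl (fun best x => if gt x best then x else best) c = c := by
            have := congrArg (fun l => l.headD c) hdec; simpa using this.symm
          rw [hm]; exact hc
        | cons y u' =>
          have hy : y = c := by
            have := congrArg (fun l => l.headD c) hdec; simpa using this.symm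
          have hmc := hu c (by simp [hy])
          exact hchain _ c d hmc (hasym c d hc)
      refine ⟨d :: u, v, by simpa using congrArg (d :: ·) hdec, ?_, hv⟩
      intro x hx
      rcases List.mem_cons.1 hx with rfl | hx'
      · exact hgm
      · exact hu x hx' 
    · rw [if_neg hc]
      have hcf : gt c d = false := by simpa using hc
      obtain ⟨u, v, hdec, hu, hv⟩ := ih d
      cases u with
      | nil =>
        have hm : rest'.foldl (fun best x => if gt x best then x else best) d = d := by
          have := congrArg (fun l => l.headD d) hdec; simpa using this.symm
        have hveq : v = rest' := by
          have := congrArg List.tail hdec; simpa [hm] using this.symm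
        rw [hm] at hv ⊢
        refine ⟨[], c :: rest', by simp, by simp, ?_⟩
        intro x hx
        rcases List.mem_cons.1 hx with rfl | hx'
        · exact hcf
        · exact hv x (by rw [hveq]; exact hx')
      | cons y u' =>
        have hy : y = d := by
          have := congrArg (fun l => l.headD d) hdec; simpa using this.symm
        rw [hy] at hdec hu
        have hrest : rest' = u' ++ rest'.foldl (fun best x => if gt x best then x else best) d :: v := by
          have := congrArg List.tail hdec; simpa using this
        refine ⟨d :: c :: u', v, by simpa using congrArg (d :: ·) hrest, ?_, hv⟩
        intro x hx
        rcases List.mem_cons.1 hx with rfl | hx'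
        · exact hu x (by simp)
        rcases List.mem_cons.1 hx' with rfl | hx''
        · exact hchain _ d x (hu d (by simp)) hcf
        · exact hu x (by simp [hx''])

theorem pvFirstMax_unique {α : Type} (gt : α → α → Bool) (l : List α) (m m' : α)
    (h1 : pvIsFirstMax gt l m) (h2 : pvIsFirstMax gt l m') : m = m' := by
  obtain ⟨u1, v1, e1, hu1, hv1⟩ := h1
  obtain ⟨u2, v2, e2, hu2, hv2⟩ := h2
  induction l generalizing u1 u2 with
  | nil => exact absurd e1 (by simp)
  | cons a t ih =>
    cases u1 with
    | nil =>
      cases u2 with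
      | nil =>
        have hm : m = a := by
          have := congrArg (fun l => l.headD a) e1; simpa using this.symm
        have hm' : m' = a := by
          have := congrArg (fun l => l.headD a) e2; simpa using this.symm
        rw [hm, hm']
      | cons b u2' =>
        exfalso
        have hma : m = a := by
          have := congrArg (fun l => l.headD a) e1; simpa using this.symm
        have hba : b = a := by
          have := congrArg (fun l => l.headD a) e2; simpa using this.symm
        have ht1 : v1 = t := by
          have := congrArg List.tail e1; simpa [hma] using this.symm
        have ht2 : t = u2' ++ m' :: v2 := by
          have := congrArg List.tail e2; simpa using this
        have hmem : m' ∈ v1 := by rw [ht1, ht2]; simp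
        have h1 := hv1 m' hmem
        have h2 := hu2 a (by simp [hba])
        rw [← hma] at h2; rw [h2] at h1; exact absurd h1 (by simp)
    | cons b u1' =>
      cases u2 with
      | nil =>
        exfalso
        have hma : m' = a := by
          have := congrArg (fun l => l.headD a) e2; simpa using this.symm
        have hba : b = a := by
          have := congrArg (fun l => l.headD a) e1; simpa using this.symm
        have ht2 : v2 = t := by
          have := congrArg List.tail e2; simpa [hma] using this.symm
        have ht1 : t = u1' ++ m :: v1 := by
          have := congrArg List.tail e1; simpa using this
        have hmem : m ∈ v2 := by rw [ht2, ht1]; simp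
        have h1 := hv2 m hmem
        have h2 := hu1 a (by simp [hba])
        rw [← hma] at h2; rw [h2] at h1; exact absurd h1 (by simp)
      | cons b2 u2' =>
        have ht1 : t = u1' ++ m :: v1 := by
          have := congrArg List.tail e1; simpa using this
        have ht2 : t = u2' ++ m' :: v2 := by
          have := congrArg List.tail e2; simpa using this
        exact ih u1' ht1 (fun x hx => hu1 x (by simp [hx])) u2' ht2
          (fun x hx => hu2 x (by simp [hx]))

theorem pvFirstMax_congr {α : Type} (gt gt' : α → α → Bool) (l : List α) (m : α)
    (h : ∀ x ∈ l, ∀ y ∈ l, gt x y = gt' x y)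
    (hm : pvIsFirstMax gt l m) : pvIsFirstMax gt' l m := by
  obtain ⟨u, v, e, hu, hv⟩ := hm
  have hmem : ∀ x, x ∈ u ∨ x = m ∨ x ∈ v → x ∈ l := by
    intro x hx; rw [e]
    rcases hx with h1 | rfl | h2
    · simp [h1]
    · simp
    · simp [h2]
  exact ⟨u, v, e,
    fun x hx => (h m (hmem m (Or.inr (Or.inl rfl))) x (hmem x (Or.inl hx))).symm ▸ hu x hx,
    fun x hx => (h x (hmem x (Or.inr (Or.inr hx))) m (hmem m (Or.inr (Or.inl rfl)))).symm ▸ hv x hx⟩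

theorem pvFilter_decomp {α : Type} (p : α → Bool) (l : List α) (u' v' : List α) (m : α)
    (h : l.filter p = u' ++ m :: v') :
    ∃ u v, l = u ++ m :: v ∧ u.filter p = u' ∧ v.filter p = v' ∧ p m = true := by
  induction l generalizing u' with
  | nil => exact absurd h (by simp)
  | cons a t ih =>
    by_cases hp : p a = true
    · rw [List.filter_cons_of_pos hp] at h
      cases u' with
      | nil =>
        have hma : m = a := by simpa using (congrArg (fun l => l.headD a) h).symm
        have hv : t.filter p = v' := by simpa using congrArg List.tail h
        exact ⟨[], t, by simp [hma], by simp, hv, hma ▸ hp⟩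
      | cons b u'' =>
        have hba : b = a := by simpa using (congrArg (fun l => l.headD a) h).symm
        have ht : t.filter p = u'' ++ m :: v' := by simpa using congrArg List.tail h
        obtain ⟨u, v, e, hfu, hfv, hpm⟩ := ih u'' ht
        exact ⟨a :: u, v, by simp [e], by simp [List.filter_cons_of_pos hp, hfu, hba], hfv, hpm⟩
    · rw [List.filter_cons_of_neg (by simpa using hp)] at h
      obtain ⟨u, v, e, hfu, hfv, hpm⟩ := ih u' h
      exact ⟨a :: u, v, by simp [e],
        by simp [List.filter_cons_of_neg (by simpa using hp), hfu], hfv, hpm⟩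

theorem pvFirstMax_lift_filter {α : Type} (p : α → Bool) (gt gt' : α → α → Bool) (l : List α) (m : α)
    (h_high : ∀ x y, p x = true → p y = false → gt x y = true)
    (h_low : ∀ x y, p x = false → p y = true → gt x y = false)
    (h_agree : ∀ x y, p x = true → p y = true → gt x y = gt' x y)
    (hm : pvIsFirstMax gt' (l.filter p) m) : pvIsFirstMax gt l m := by
  obtain ⟨u', v', e, hu, hv⟩ := hm
  obtain ⟨u, v, edec, hfu, hfv, hpm⟩ := pvFilter_decomp p l u' v' m e
  refine ⟨u, v, edec, ?_, ?_⟩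
  · intro x hx
    by_cases hpx : p x = true
    · have hx' : x ∈ u' := by rw [← hfu]; exact List.mem_filter.2 ⟨hx, hpx⟩
      rw [h_agree m x hpm hpx]; exact hu x hx'
    · exact h_high m x hpm (by simpa using hpx)
  · intro x hx
    by_cases hpx : p x = true
    · have hx' : x ∈ v' := by rw [← hfv]; exact List.mem_filter.2 ⟨hx, hpx⟩
      rw [h_agree x m hpx hpm]; exact hv x hx'
    · exact h_low x m (by simpa using hpx) hpm

-- secondary lexicographic tests used only in the proof
def pvGt2 (a b : Int × Int) : Bool :=
  decide (b.1 < a.1) || (a.1 == b.1 && decide (b.2 < a.2))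
def pvKey2 (c : PySem.Dict String String) : Int × Int :=
  ((if pvDescTest c then 1 else 0), pvCompletenessScore c)
def pvGtD (a b : PySem.Dict String String) : Bool := pvGtKey (pvKeyB a) (pvKeyB b)
def pvGtD2 (a b : PySem.Dict String String) : Bool := pvGt2 (pvKey2 a) (pvKey2 b)
def pvGtS (a b : PySem.Dict String String) : Bool :=
  decide (pvCompletenessScore b < pvCompletenessScore a)

theorem pvGtD_asym : ∀ a b, pvGtD a b = true → pvGtD b a = false := by
  intro a b; simp only [pvGtD, pvGtKey]; intro h
  simp only [Bool.or_eq_true, Bool.and_eq_true, decide_eq_true_eq, beq_iff_eq] at h ⊢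
  simp only [Bool.or_eq_false_iff, Bool.and_eq_false_iff, decide_eq_false_iff_not, beq_eq_false_iff_ne]
  omega

theorem pvGtD_chain : ∀ a b c, pvGtD a b = true → pvGtD c b = false → pvGtD a c = true := by
  intro a b c; simp only [pvGtD, pvGtKey]
  simp only [Bool.or_eq_true, Bool.and_eq_true, decide_eq_true_eq, beq_iff_eq,
    Bool.or_eq_false_iff, Bool.and_eq_false_iff, decide_eq_false_iff_not, beq_eq_false_iff_ne]
  omega

theorem pvGtS_asym : ∀ a b, pvGtS a b = true → pvGtS b a = false := by
  intro a b; simp only [pvGtS, decide_eq_true_eq, decide_eq_false_iff_not]; omega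

theorem pvGtS_chain : ∀ a b c, pvGtS a b = true → pvGtS c b = false → pvGtS a c = true := by
  intro a b c; simp only [pvGtS, decide_eq_true_eq, decide_eq_false_iff_not]; omega

-- within equal 'found' bits, the triple test is the pair test
theorem pvGtD_eq_gtD2_of_found_eq (a b : PySem.Dict String String)
    (h : pvFoundTest a = pvFoundTest b) : pvGtD a b = pvGtD2 a b := by
  rw [Bool.eq_iff_iff]
  simp [pvGtD, pvGtD2, pvGtKey, pvGt2, pvKeyB, pvKey2, h]

theorem pvGtD2_eq_gtS_of_desc_eq (a b : PySem.Dict String String)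
    (h : pvDescTest a = pvDescTest b) : pvGtD2 a b = pvGtS a b := by
  rw [Bool.eq_iff_iff]
  simp [pvGtD2, pvGtS, pvGt2, pvKey2, h]

theorem pvGtD_high (x y : PySem.Dict String String)
    (hx : pvFoundTest x = true) (hy : pvFoundTest y = false) : pvGtD x y = true := by
  simp [pvGtD, pvGtKey, pvKeyB, hx, hy]

theorem pvGtD_low (x y : PySem.Dict String String)
    (hx : pvFoundTest x = false) (hy : pvFoundTest y = true) : pvGtD x y = false := by
  simp [pvGtD, pvGtKey, pvKeyB, hx, hy]

theorem pvGtD2_high (x y : PySem.Dict String String)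
    (hx : pvDescTest x = true) (hy : pvDescTest y = false) : pvGtD2 x y = true := by
  simp [pvGtD2, pvGt2, pvKey2, hx, hy]

theorem pvGtD2_low (x y : PySem.Dict String String)
    (hx : pvDescTest x = false) (hy : pvDescTest y = true) : pvGtD2 x y = false := by
  simp [pvGtD2, pvGt2, pvKey2, hx, hy]

-- max? over a nonempty list is the running-best fold from the head
theorem pvMax?_cons (key : PySem.Dict String String → Int) (c : PySem.Dict String String)
    (t : List (PySem.Dict String String)) :
    PySem.List.max? (c :: t) key =
      some (t.foldl (fun best x => if decide (key best < key x) then x else best) c) := by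
  show List.foldl _ (some c) t = _
  induction t generalizing c with
  | nil => rfl
  | cons x t' ih =>
    simp only [List.foldl_cons]
    by_cases h : key c < key x
    · rw [if_pos (by simpa using h), if_pos (by simpa using h)]; exact ih x
    · rw [if_neg (by simpa using h), if_neg (by simpa using h)]; exact ih c

-- ===== VERDICT (by name: the statement is the Claim_ definition above) =====
theorem select_best_clinical_code_entry_py_spec : Claim_equal_select_best_clinical_code_entry_py := by
  intro codes_group _hdom hpre
  unfold Spec_select_best_clinical_code_entry_py
  unfold select_best_clinical_code_entry_py select_best_clinical_code_entry_py_alt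
  cases hds : codes_group.map PySem.Dict.ofList with
  | nil => exact absurd (List.map_eq_nil_iff.mp hds) hpre
  | cons d rest =>
    simp only []
    by_cases hlen : (d :: rest).length = 1
    · have hrest : rest = [] := by simpa using hlen
      subst hrest
      simp
    · rw [if_neg hlen]
      have hBfm : pvIsFirstMax pvGtD (d :: rest)
          (rest.foldl (fun best c => if pvGtKey (pvKeyB c) (pvKeyB best) then c else best) d) := by
        simpa [pvGtD] using pvFold_firstMax pvGtD pvGtD_asym pvGtD_chain d rest
      set F := (d :: rest).filter pvFoundTest with hF
      set g1 := if F.isEmpty then d :: rest else F with hg1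
      set C := g1.filter pvDescTest with hC
      set g2 := if C.isEmpty then g1 else C with hg2
      have hg1ne : g1 ≠ [] := by
        rw [hg1]; split
        · simp
        · rename_i hne; simpa [List.isEmpty_iff] using hne
      have hg2ne : g2 ≠ [] := by
        rw [hg2]; split
        · exact hg1ne
        · rename_i hne; simpa [List.isEmpty_iff] using hne
      obtain ⟨c, t, hct⟩ := List.exists_cons_of_ne_nil hg2ne
      rw [hct, pvMax?_cons]
      set mA := t.foldl (fun best x => if decide (pvCompletenessScore best < pvCompletenessScore x) then x else best) c with hmA
      have hA : pvIsFirstMax pvGtS g2 mA := by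
        rw [hct]
        have h0 := pvFold_firstMax pvGtS pvGtS_asym pvGtS_chain c t
        simpa [pvGtS, hmA] using h0
      have hA2 : pvIsFirstMax pvGtD2 g1 mA := by
        rw [hg2] at hA
        by_cases hemp : C.isEmpty
        · rw [if_pos hemp] at hA
          have hall : ∀ x ∈ g1, pvDescTest x = false := by
            have hCnil : C = [] := List.isEmpty_iff.mp hemp
            rw [hC] at hCnil
            intro x hx
            simpa using List.filter_eq_nil_iff.mp hCnil x hx
          exact pvFirstMax_congr pvGtS pvGtD2 g1 mA
            (fun x hx y hy => (pvGtD2_eq_gtS_of_desc_eq x y (by rw [hall x hx, hall y hy])).symm) hA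
        · rw [if_neg hemp, hC] at hA
          exact pvFirstMax_lift_filter pvDescTest pvGtD2 pvGtS g1 mA pvGtD2_high pvGtD2_low
            (fun x y hx hy => pvGtD2_eq_gtS_of_desc_eq x y (hx.trans hy.symm)) hA
      have hA3 : pvIsFirstMax pvGtD (d :: rest) mA := by
        rw [hg1] at hA2
        by_cases hemp : F.isEmpty
        · rw [if_pos hemp] at hA2
          have hall : ∀ x ∈ d :: rest, pvFoundTest x = false := by
            have hFnil : F = [] := List.isEmpty_iff.mp hemp
            rw [hF] at hFnil
            intro x hx
            simpa using List.filter_eq_nil_iff.mp hFnil x hx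
          exact pvFirstMax_congr pvGtD2 pvGtD (d :: rest) mA
            (fun x hx y hy => (pvGtD_eq_gtD2_of_found_eq x y (by rw [hall x hx, hall y hy])).symm) hA2
        · rw [if_neg hemp, hF] at hA2
          exact pvFirstMax_lift_filter pvFoundTest pvGtD pvGtD2 (d :: rest) mA pvGtD_high pvGtD_low
            (fun x y hx hy => pvGtD_eq_gtD2_of_found_eq x y (hx.trans hy.symm)) hA2
      exact congrArg PySem.Dict.items (pvFirstMax_unique pvGtD (d :: rest) mA _ hA3 hBfm)
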